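-- pv_equiv track=rewrite | github.com/shuckerino/Uni | Bioinformatics/Chapter07/Lab07/alignment_game.py | play_alignment_game_greedy
-- ===== SOURCE A (Python) =====
-- def play_alignment_game_greedy(v: str, w: str):
--     '''
--     Align two sequences in a greedy way
--
--     '''
--     score = 0
--     v_aligned = ""
--     w_aligned = ""
--     v_pointer = 0
--     w_pointer = 0
--
--     while v_pointer < len(v) and w_pointer < len(w):
--         if v[v_pointer] == w[w_pointer]:  # match, so plus 1 point
--             score += 1
--             v_aligned += v[v_pointer]
--             w_aligned += w[w_pointer]
--             v_pointer += 1
--             w_pointer += 1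
--         else:  # gap or mismatch
--             v_aligned += v[v_pointer]
--             v_pointer += 1
--             w_aligned += "-"
--
--     return v_aligned, w_aligned, score
-- ===== SOURCE B (Python) =====
-- def play_alignment_game_greedy(v: str, w: str):
--     # pass 1: greedily collect the indices of v that match successive chars of w
--     matches = []
--     wp = 0
--     for i, ch in enumerate(v):
--         if wp == len(w):
--             break
--         if ch == w[wp]:
--             matches.append(i)
--             wp += 1
--     # where the alignment ends
--     if not w:
--         end = 0
--     elif len(matches) == len(w):
--         end = matches[-1] + 1
--     else:
--         end = len(v)
--     # pass 2: rebuild both aligned strings; matches is increasing, so a single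
--     # merge-walk places each matched char of w at its recorded position
--     v_aligned = v[:end]
--     out = []
--     j = 0
--     for i in range(end):
--         if j < len(matches) and matches[j] == i:
--             out.append(w[j])
--             j += 1
--         else:
--             out.append("-")
--     w_aligned = "".join(out)
--     return v_aligned, w_aligned, len(matches)
-- ===== Notes on version B (the rewrite author's own statement) =====
-- stated objective: alternative
-- what changed: Instead of one interleaved while-loop building both strings char by char, B first collects the greedy match indices in a single pass, computes the alignment end from them in closed form, and then reconstructs v_aligned with a slice and w_aligned by a merge-walk over the increasing match-index list.
import Mathlib
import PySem

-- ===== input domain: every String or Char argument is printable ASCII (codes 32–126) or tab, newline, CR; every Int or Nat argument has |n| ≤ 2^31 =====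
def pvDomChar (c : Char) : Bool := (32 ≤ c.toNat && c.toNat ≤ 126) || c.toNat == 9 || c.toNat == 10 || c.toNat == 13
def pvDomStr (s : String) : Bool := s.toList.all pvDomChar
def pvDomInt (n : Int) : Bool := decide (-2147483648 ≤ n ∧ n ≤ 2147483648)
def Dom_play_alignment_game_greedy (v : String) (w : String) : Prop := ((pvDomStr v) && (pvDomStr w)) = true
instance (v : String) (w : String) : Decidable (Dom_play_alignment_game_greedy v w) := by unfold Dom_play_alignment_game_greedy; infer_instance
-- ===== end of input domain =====

-- B re-derives the alignment from a first pass collecting greedy match indices, then rebuilds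
-- both strings positionally (same values as A; objective: alternative decomposition).

-- ===== PORT A =====
-- A's while-loop: two pointers become the two remaining suffixes of v and w;
-- the accumulators v_aligned, w_aligned, score are carried through the recursion.
def pvLoopA (v w va wa : List Char) (s : Int) : List Char × List Char × Int :=
  match v, w with
  | [], _ => (va, wa, s)
  | _ :: _, [] => (va, wa, s)
  | c :: vs, d :: ws =>
    if c = d then pvLoopA vs ws (va ++ [c]) (wa ++ [d]) (s + 1)
    else pvLoopA vs (d :: ws) (va ++ [c]) (wa ++ ['-']) s

def play_alignment_game_greedy (v : String) (w : String) : String × String × Int :=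
  let r := pvLoopA v.toList w.toList [] [] 0
  (String.ofList r.1, String.ofList r.2.1, r.2.2)

-- ===== PORT B =====
-- Source B's first pass: walk v with its index, consuming the remaining suffix of w on a match.
def pvCollect (i : Nat) (v w : List Char) : List Nat :=
  match v, w with
  | [], _ => []
  | _ :: _, [] => []
  | c :: vs, d :: ws =>
    if c = d then i :: pvCollect (i + 1) vs ws else pvCollect (i + 1) vs (d :: ws)

-- Source B's second for-loop over range(end): e counts the remaining iterations, i is the
-- current index, the pointer j into matches becomes the remaining suffix ms (j itself is
-- kept to read w[j]; that index is always in range when reached, since the number of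
-- matches never exceeds len(w), so getD's default is never used).
def pvWa (e : Nat) (ms : List Nat) (w : List Char) (i j : Nat) : List Char :=
  match e with
  | 0 => []
  | e' + 1 =>
    match ms with
    | [] => '-' :: pvWa e' [] w (i + 1) j
    | m :: rest =>
      if m = i then w.getD j '-' :: pvWa e' rest w (i + 1) (j + 1)
      else '-' :: pvWa e' (m :: rest) w (i + 1) j

def play_alignment_game_greedy_alt (v : String) (w : String) : String × String × Int :=
  let vl := v.toList
  let wl := w.toList
  let ms := pvCollect 0 vl wl
  -- matches[-1] is taken only when ms is nonempty (len(matches) = len(w) ≠ 0)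
  let e : Nat :=
    if wl.isEmpty then 0
    else if ms.length = wl.length then ms.getLastD 0 + 1
    else vl.length
  (String.ofList (vl.take e), String.ofList (pvWa e ms wl 0 0), (ms.length : Int))

-- ===== PRECONDITION & SPEC =====
def Spec_play_alignment_game_greedy (v : String) (w : String) (out : String × String × Int) : Prop := out = play_alignment_game_greedy_alt v w
instance (v : String) (w : String) (out : String × String × Int) : Decidable (Spec_play_alignment_game_greedy v w out) := by unfold Spec_play_alignment_game_greedy; infer_instance

-- ===== CLAIM (what is proved, stated in full; the proofs are below) =====
def Claim_equal_play_alignment_game_greedy : Prop := ∀ (v : String) (w : String), Dom_play_alignment_game_greedy v w → Spec_play_alignment_game_greedy v w (play_alignment_game_greedy v w)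

-- ===== LEMMAS AND PROOFS =====

-- the end index of the alignment, as B computes it
def pvEnd (v w : List Char) : Nat :=
  if w.isEmpty then 0
  else if (pvCollect 0 v w).length = w.length then (pvCollect 0 v w).getLastD 0 + 1
  else v.length

-- B's core on char lists, phrased via pvEnd (definitionally the body of the port)
def pvBcore (v w : List Char) : List Char × List Char × Int :=
  (v.take (pvEnd v w),
   pvWa (pvEnd v w) (pvCollect 0 v w) w 0 0,
   ((pvCollect 0 v w).length : Int))

theorem pvLoopA_acc (v : List Char) : ∀ (w va wa : List Char) (s : Int),
    pvLoopA v w va wa s =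
      (va ++ (pvLoopA v w [] [] 0).1, wa ++ (pvLoopA v w [] [] 0).2.1,
        s + (pvLoopA v w [] [] 0).2.2) := by
  induction v with
  | nil => intro w va wa s; cases w <;> simp [pvLoopA]
  | cons c vs ih =>
    intro w va wa s
    cases w with
    | nil => simp [pvLoopA]
    | cons d ws =>
      by_cases h : c = d
      · simp only [pvLoopA, if_pos h, List.nil_append, zero_add]
        rw [ih ws (va ++ [c]) (wa ++ [d]) (s + 1), ih ws [c] [d] 1]
        simp; ring
      · simp only [pvLoopA, if_neg h, List.nil_append]
        rw [ih (d :: ws) (va ++ [c]) (wa ++ ['-']) s, ih (d :: ws) [c] ['-'] 0]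
        simp

theorem pvCollect_shift (v : List Char) : ∀ (w : List Char) (i : Nat),
    pvCollect (i + 1) v w = (pvCollect i v w).map (· + 1) := by
  induction v with
  | nil => intro w i; cases w <;> simp [pvCollect]
  | cons c vs ih =>
    intro w i
    cases w with
    | nil => simp [pvCollect]
    | cons d ws =>
      by_cases h : c = d <;> simp [pvCollect, h, ih]

theorem pvCollect_nil (v : List Char) (i : Nat) : pvCollect i v [] = [] := by
  cases v <;> rfl

theorem pvCollect_cons_match (c : Char) (vs ws : List Char) :
    pvCollect 0 (c :: vs) (c :: ws) = 0 :: (pvCollect 0 vs ws).map (· + 1) := by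
  show (if c = c then 0 :: pvCollect (0 + 1) vs ws else pvCollect (0 + 1) vs (c :: ws)) = _
  rw [if_pos rfl, pvCollect_shift]

theorem pvCollect_cons_mismatch (c d : Char) (vs ws : List Char) (h : c ≠ d) :
    pvCollect 0 (c :: vs) (d :: ws) = (pvCollect 0 vs (d :: ws)).map (· + 1) := by
  show (if c = d then 0 :: pvCollect (0 + 1) vs ws else pvCollect (0 + 1) vs (d :: ws)) = _
  rw [if_neg h, pvCollect_shift]

theorem pvWa_shift (e : Nat) : ∀ (ms : List Nat) (w : List Char) (i j : Nat),
    pvWa e (ms.map (· + 1)) w (i + 1) j = pvWa e ms w i j := by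
  induction e with
  | zero => intro ms w i j; rfl
  | succ e ih =>
    intro ms w i j
    cases ms with
    | nil =>
      show '-' :: pvWa e [] w (i + 1 + 1) j = '-' :: pvWa e [] w (i + 1) j
      exact congrArg (fun l => '-' :: l) (ih [] w (i + 1) j)
    | cons m rest =>
      by_cases h : m = i
      · show (if m + 1 = i + 1 then _ else _) = (if m = i then _ else _)
        rw [if_pos (by omega : m + 1 = i + 1), if_pos h]
        exact congrArg (fun l => w.getD j '-' :: l) (ih rest w (i + 1) (j + 1))
      · show (if m + 1 = i + 1 then _ else _) = (if m = i then _ else _)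
        rw [if_neg (by omega : ¬ m + 1 = i + 1), if_neg h]
        exact congrArg (fun l => '-' :: l) (ih (m :: rest) w (i + 1) j)

theorem pvWa_shift_cons (e : Nat) : ∀ (ms : List Nat) (d : Char) (ws : List Char) (i j : Nat),
    pvWa e (ms.map (· + 1)) (d :: ws) (i + 1) (j + 1) = pvWa e ms ws i j := by
  induction e with
  | zero => intro ms d ws i j; rfl
  | succ e ih =>
    intro ms d ws i j
    cases ms with
    | nil =>
      show '-' :: pvWa e [] (d :: ws) (i + 1 + 1) (j + 1) = '-' :: pvWa e [] ws (i + 1) j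
      exact congrArg (fun l => '-' :: l) (ih [] d ws (i + 1) j)
    | cons m rest =>
      by_cases h : m = i
      · show (if m + 1 = i + 1 then _ else _) = (if m = i then _ else _)
        rw [if_pos (by omega : m + 1 = i + 1), if_pos h]
        show (d :: ws).getD (j + 1) '-' :: pvWa e (rest.map (· + 1)) (d :: ws) (i + 1 + 1) (j + 1 + 1)
            = ws.getD j '-' :: pvWa e rest ws (i + 1) (j + 1)
        rw [List.getD_cons_succ, ih rest d ws (i + 1) (j + 1)]
      · show (if m + 1 = i + 1 then _ else _) = (if m = i then _ else _)
        rw [if_neg (by omega : ¬ m + 1 = i + 1), if_neg h]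
        exact congrArg (fun l => '-' :: l) (ih (m :: rest) d ws (i + 1) j)

theorem pvGetLastD_map (ms : List Nat) : ∀ (d : Nat),
    (ms.map (· + 1)).getLastD (d + 1) = ms.getLastD d + 1 := by
  induction ms with
  | nil => intro d; rfl
  | cons m rest ih =>
    intro d
    rw [List.map_cons, List.getLastD_cons, List.getLastD_cons, ih]

theorem pvGetLastD_map_succ (m : Nat) (rest : List Nat) :
    ((m :: rest).map (· + 1)).getLastD 0 = (m :: rest).getLastD 0 + 1 := by
  rw [List.map_cons, List.getLastD_cons, List.getLastD_cons, pvGetLastD_map]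

theorem pvEnd_match (c : Char) (vs ws : List Char) :
    pvEnd (c :: vs) (c :: ws) = pvEnd vs ws + 1 := by
  unfold pvEnd
  rw [pvCollect_cons_match]
  cases hws : ws with
  | nil =>
    rw [pvCollect_nil]
    simp [List.getLastD]
  | cons a l =>
    cases hms : pvCollect 0 vs (a :: l) with
    | nil =>
      simp only [List.isEmpty_cons, Bool.false_eq_true, if_false, List.map_nil,
        List.length_nil, List.length_cons]
      have h1 : ¬(0 + 1 = l.length + 1 + 1) := by omega
      have h2 : ¬(0 = l.length + 1) := by omega
      rw [if_neg h1, if_neg h2]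
    | cons m rest =>
      by_cases hfull : (m :: rest).length = (a :: l).length
      · have h1 : (0 :: ((m :: rest).map (· + 1))).length = (c :: a :: l).length := by
          simp only [List.length_cons, List.length_map] at hfull ⊢; omega
        rw [if_pos h1, if_pos hfull]
        have : (0 :: ((m :: rest).map (· + 1))).getLastD 0
            = ((m :: rest).map (· + 1)).getLastD 0 := by
          rw [List.getLastD_cons]
        rw [this, pvGetLastD_map_succ]
        simp
      · have h1 : (0 :: ((m :: rest).map (· + 1))).length ≠ (c :: a :: l).length := by
          simp only [List.length_cons, List.length_map] at hfull ⊢; omega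
        rw [if_neg h1, if_neg hfull]
        simp

theorem pvEnd_mismatch (c d : Char) (vs ws : List Char) (h : c ≠ d) :
    pvEnd (c :: vs) (d :: ws) = pvEnd vs (d :: ws) + 1 := by
  unfold pvEnd
  rw [pvCollect_cons_mismatch c d vs ws h]
  cases hms : pvCollect 0 vs (d :: ws) with
  | nil =>
    simp only [List.isEmpty_cons, Bool.false_eq_true, if_false, List.map_nil,
      List.length_nil, List.length_cons]
    have h2 : ¬(0 = ws.length + 1) := by omega
    rw [if_neg h2, if_neg h2]
  | cons m rest =>
    by_cases hfull : (m :: rest).length = (d :: ws).length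
    · have h1 : ((m :: rest).map (· + 1)).length = (d :: ws).length := by
        simpa using hfull
      rw [if_pos h1, if_pos hfull, pvGetLastD_map_succ]
      simp
    · have h1 : ((m :: rest).map (· + 1)).length ≠ (d :: ws).length := by
        simpa using hfull
      rw [if_neg h1, if_neg hfull]
      simp

theorem pvWa_match (c : Char) (vs ws : List Char) (e : Nat) :
    pvWa (e + 1) (pvCollect 0 (c :: vs) (c :: ws)) (c :: ws) 0 0
      = c :: pvWa e (pvCollect 0 vs ws) ws 0 0 := by
  rw [pvCollect_cons_match]
  show (if (0 : Nat) = 0 then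
        (c :: ws).getD 0 '-' ::
          pvWa e ((pvCollect 0 vs ws).map (· + 1)) (c :: ws) (0 + 1) (0 + 1)
      else '-' :: pvWa e (0 :: (pvCollect 0 vs ws).map (· + 1)) (c :: ws) (0 + 1) 0)
    = c :: pvWa e (pvCollect 0 vs ws) ws 0 0
  rw [if_pos rfl, pvWa_shift_cons]
  rfl

theorem pvWa_mismatch (c d : Char) (vs ws : List Char) (h : c ≠ d) (e : Nat) :
    pvWa (e + 1) (pvCollect 0 (c :: vs) (d :: ws)) (d :: ws) 0 0
      = '-' :: pvWa e (pvCollect 0 vs (d :: ws)) (d :: ws) 0 0 := by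
  rw [pvCollect_cons_mismatch c d vs ws h]
  cases hms : pvCollect 0 vs (d :: ws) with
  | nil =>
    show '-' :: pvWa e (([] : List Nat).map (· + 1)) (d :: ws) (0 + 1) 0
        = '-' :: pvWa e [] (d :: ws) 0 0
    rw [pvWa_shift]
  | cons m rest =>
    show (if m + 1 = 0 then
          (d :: ws).getD 0 '-' :: pvWa e (rest.map (· + 1)) (d :: ws) (0 + 1) (0 + 1)
        else '-' :: pvWa e ((m + 1) :: rest.map (· + 1)) (d :: ws) (0 + 1) 0)
      = '-' :: pvWa e (m :: rest) (d :: ws) 0 0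
    rw [if_neg (by omega : ¬ m + 1 = 0)]
    show '-' :: pvWa e ((m :: rest).map (· + 1)) (d :: ws) (0 + 1) 0
        = '-' :: pvWa e (m :: rest) (d :: ws) 0 0
    rw [pvWa_shift]

theorem pvMain (v : List Char) : ∀ (w : List Char),
    pvLoopA v w [] [] 0 = pvBcore v w := by
  induction v with
  | nil => intro w; cases w <;> rfl
  | cons c vs ih =>
    intro w
    cases w with
    | nil => rfl
    | cons d ws =>
      by_cases h : c = d
      · subst h
        rw [show pvLoopA (c :: vs) (c :: ws) [] [] 0 = pvLoopA vs ws [c] [c] 1 from by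
            simp [pvLoopA]]
        rw [pvLoopA_acc, ih ws]
        unfold pvBcore
        rw [pvEnd_match, pvWa_match, pvCollect_cons_match, List.take_succ_cons]
        refine Prod.ext ?_ (Prod.ext ?_ ?_)
        · simp
        · simp
        · simp only [List.length_cons, List.length_map]
          push_cast; ring
      · rw [show pvLoopA (c :: vs) (d :: ws) [] [] 0 = pvLoopA vs (d :: ws) [c] ['-'] 0 from by
            simp [pvLoopA, h]]
        rw [pvLoopA_acc, ih (d :: ws)]
        unfold pvBcore
        rw [pvEnd_mismatch c d vs ws h, pvWa_mismatch c d vs ws h, pvCollect_cons_mismatch c d vs ws h,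
          List.take_succ_cons]
        refine Prod.ext ?_ (Prod.ext ?_ ?_)
        · simp
        · simp
        · simp

-- ===== VERDICT (by name: the statement is the Claim_ definition above) =====
theorem play_alignment_game_greedy_spec : Claim_equal_play_alignment_game_greedy := by
  intro v w _
  show _ = _
  unfold play_alignment_game_greedy play_alignment_game_greedy_alt
  rw [pvMain v.toList w.toList]
  rfl
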